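-- pv_equiv track=rewrite | github.com/ajsaraujo/aoc | 2020/d09b.py | encryption_weakness
-- ===== SOURCE A (Python) =====
-- def encryption_weakness(invalid_number, numbers):
--     for i in range(len(numbers)):
--         total = numbers[i]
--
--         minimal = numbers[i]
--         maximum = numbers[i]
--
--         for j in range(i + 1, len(numbers)):
--             total += numbers[j]
--
--             minimal = min(minimal, numbers[j])
--             maximum = max(maximum, numbers[j])
--
--             if total == invalid_number:
--                 return minimal + maximum
--
--             if total > invalid_number:
--                 break
-- ===== SOURCE B (Python) =====
-- # Segment-tree over prefix sums: for each start, jump to the first index where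
-- # the running sum reaches the target (O(n log n) instead of A's quadratic rescan).
--
-- def _build(xs):
--     # xs: nonempty list of (index, value) pairs with strictly increasing indices
--     if len(xs) == 1:
--         i, v = xs[0]
--         return ('leaf', i, v)
--     m = len(xs) // 2
--     l = _build(xs[:m])
--     r = _build(xs[m:])
--     return ('node', max(_hi(l), _hi(r)), max(_mx(l), _mx(r)), l, r)
--
-- def _hi(t):
--     return t[1]
--
-- def _mx(t):
--     return t[2]
--
-- def _first_ge(t, s, th):
--     # first index k >= s in t whose value is >= th, else None
--     if t[0] == 'leaf':
--         _, i, v = t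
--         return i if i >= s and v >= th else None
--     _, hi, mx, l, r = t
--     if hi < s or mx < th:
--         return None
--     res = _first_ge(l, s, th)
--     if res is not None:
--         return res
--     return _first_ge(r, s, th)
--
-- def encryption_weakness(invalid_number, numbers):
--     prefix = [0]
--     acc = 0
--     for x in numbers:
--         acc += x
--         prefix.append(acc)
--     tree = _build(list(enumerate(prefix)))
--     for i in range(len(numbers)):
--         k = _first_ge(tree, i + 2, prefix[i] + invalid_number)
--         if k is not None and prefix[k] == prefix[i] + invalid_number:
--             window = numbers[i:k]
--             return min(window) + max(window)
-- ===== Notes on version B (the rewrite author's own statement) =====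
-- stated objective: faster
-- what changed: B precomputes prefix sums and a max segment tree over them, so each start's inner scan (A's running total/min/max loop with break) becomes an O(log n) tree descent to the first index where the running sum reaches the target, with min/max taken from the matching slice only once.
import Mathlib
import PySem

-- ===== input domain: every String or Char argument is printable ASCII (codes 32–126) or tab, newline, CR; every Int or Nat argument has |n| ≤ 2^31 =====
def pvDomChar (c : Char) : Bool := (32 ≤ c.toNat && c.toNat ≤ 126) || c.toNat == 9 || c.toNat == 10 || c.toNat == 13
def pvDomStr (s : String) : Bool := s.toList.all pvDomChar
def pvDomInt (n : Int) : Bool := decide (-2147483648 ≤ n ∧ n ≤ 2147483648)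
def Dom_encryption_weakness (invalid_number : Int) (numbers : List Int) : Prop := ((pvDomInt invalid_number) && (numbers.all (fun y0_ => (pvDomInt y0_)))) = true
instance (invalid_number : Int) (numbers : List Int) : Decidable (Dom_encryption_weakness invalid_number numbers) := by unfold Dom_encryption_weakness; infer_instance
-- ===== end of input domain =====

-- B replaces A's quadratic restart-the-sum inner loop by a max segment tree over
-- prefix sums (first index where the running sum reaches the target found by tree
-- descent); return values agree on every input.

-- ===== PORT A =====
-- inner 'for j in range(i+1, len(numbers))' loop of A, carrying total/minimal/maximum;
-- 'return' ↦ some, 'break' / falling off the loop ↦ none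
def pvAInner (invalid : Int) (numbers : List Int) (j : Nat)
    (total minimal maximum : Int) : Option Int :=
  if h : j < numbers.length then
    let x := numbers[j]
    let total' := total + x
    let minimal' := min minimal x
    let maximum' := max maximum x
    if total' = invalid then some (minimal' + maximum')
    else if invalid < total' then none
    else pvAInner invalid numbers (j + 1) total' minimal' maximum'
  else none
termination_by numbers.length - j

-- outer 'for i in range(len(numbers))' loop of A
def pvAOuter (invalid : Int) (numbers : List Int) (i : Nat) : Option Int :=
  if h : i < numbers.length then
    match pvAInner invalid numbers (i + 1) numbers[i] numbers[i] numbers[i] with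
    | some r => some r
    | none => pvAOuter invalid numbers (i + 1)
  else none
termination_by numbers.length - i

def encryption_weakness (invalid_number : Int) (numbers : List Int) : Option Int :=
  pvAOuter invalid_number numbers 0

-- ===== PORT B =====
-- segment tree of Source B: ('leaf', i, v) / ('node', hi, mx, l, r)
inductive PvTree : Type where
  | leaf : Int → Int → PvTree
  | node : Int → Int → PvTree → PvTree → PvTree
deriving DecidableEq, Repr

def pvHi : PvTree → Int
  | .leaf i _ => i
  | .node hi _ _ _ => hi

def pvMx : PvTree → Int
  | .leaf _ v => v
  | .node _ mx _ _ => mx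

-- _build; xs[:m] / xs[m:] with 0 ≤ m ≤ len(xs) are exactly take/drop
-- (PySem.List.slice_to_natCast / slice_from_natCast); the [] branch is unreachable
-- (Python's _build is only called on nonempty lists)
def pvBuild (xs : List (Int × Int)) : PvTree :=
  if h : xs.length ≤ 1 then
    match xs with
    | [] => .leaf 0 0
    | p :: _ => .leaf p.1 p.2
  else
    let m := xs.length / 2
    let l := pvBuild (xs.take m)
    let r := pvBuild (xs.drop m)
    .node (max (pvHi l) (pvHi r)) (max (pvMx l) (pvMx r)) l r
termination_by xs.length
decreasing_by
  · simp only [List.length_take]; omega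
  · simp only [List.length_drop]; omega

-- _first_ge
def pvFirstGE (t : PvTree) (s th : Int) : Option Int :=
  match t with
  | .leaf i v => if s ≤ i ∧ th ≤ v then some i else none
  | .node hi mx l r =>
    if hi < s ∨ mx < th then none
    else
      match pvFirstGE l s th with
      | some k => some k
      | none => pvFirstGE r s th

-- main loop of Source B; prefix[i], prefix[k] are always
-- in range; min/max of the (always nonempty) window via PySem.List.min?/max?, the
-- '| _, _ => none' arm is unreachable
def pvBLoop (invalid : Int) (numbers pref : List Int) (tree : PvTree) (i : Nat) : Option Int :=
  if _h : i < numbers.length then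
    let th := PySem.List.pyGetD pref (i : Int) 0 + invalid
    match pvFirstGE tree ((i : Int) + 2) th with
    | some k =>
      if PySem.List.pyGetD pref k 0 = th then
        let window := PySem.List.slice numbers (some (i : Int)) (some k)
        match PySem.List.min? window (fun y => y), PySem.List.max? window (fun y => y) with
        | some mn, some mx => some (mn + mx)
        | _, _ => none
      else pvBLoop invalid numbers pref tree (i + 1)
    | none => pvBLoop invalid numbers pref tree (i + 1)
  else none
termination_by numbers.length - i

def encryption_weakness_alt (invalid_number : Int) (numbers : List Int) : Option Int :=
  let st := numbers.foldl (fun (st : List Int × Int) x => (st.1 ++ [st.2 + x], st.2 + x)) ([0], 0)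
  let pref := st.1
  let tree := pvBuild (PySem.List.enumerate pref 0)
  pvBLoop invalid_number numbers pref tree 0

-- ===== PRECONDITION & SPEC =====
def Spec_encryption_weakness (invalid_number : Int) (numbers : List Int) (out : Option Int) : Prop := out = encryption_weakness_alt invalid_number numbers
instance (invalid_number : Int) (numbers : List Int) (out : Option Int) : Decidable (Spec_encryption_weakness invalid_number numbers out) := by unfold Spec_encryption_weakness; infer_instance

-- ===== CLAIM (what is proved, stated in full; the proofs are below) =====
def Claim_equal_encryption_weakness : Prop := ∀ (invalid_number : Int) (numbers : List Int), Dom_encryption_weakness invalid_number numbers → Spec_encryption_weakness invalid_number numbers (encryption_weakness invalid_number numbers)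

-- ===== LEMMAS AND PROOFS =====

-- the (index, value) pairs stored at a tree's leaves, left to right
def pvToList : PvTree → List (Int × Int)
  | .leaf i v => [(i, v)]
  | .node _ _ l r => pvToList l ++ pvToList r

-- the node summaries really bound the subtree's indices and values
def pvWf : PvTree → Prop
  | .leaf _ _ => True
  | .node hi mx l r => pvWf l ∧ pvWf r ∧ ∀ p ∈ pvToList l ++ pvToList r, p.1 ≤ hi ∧ p.2 ≤ mx

-- linear reference scan: first offset a' ≥ a (the list starting at offset a) with
-- s ≤ a' and th ≤ value
def pvScanI (l : List Int) (a s th : Int) : Option Int :=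
  match l with
  | [] => none
  | x :: xs => if s ≤ a ∧ th ≤ x then some a else pvScanI xs (a + 1) s th

-- reference pref-sum tail: pvPfxFrom a xs = partial sums a+x₁, a+x₁+x₂, …
def pvPfxFrom (a : Int) : List Int → List Int
  | [] => []
  | x :: xs => (a + x) :: pvPfxFrom (a + x) xs

theorem pvBuild_spec : ∀ (N : Nat) (xs : List (Int × Int)), xs.length ≤ N → xs ≠ [] →
    pvToList (pvBuild xs) = xs ∧ pvWf (pvBuild xs) ∧
    (∀ p ∈ xs, p.1 ≤ pvHi (pvBuild xs) ∧ p.2 ≤ pvMx (pvBuild xs)) := by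
  intro N
  induction N with
  | zero => intro xs h hne; interval_cases h' : xs.length <;> simp_all
  | succ N ih =>
    intro xs hlen hne
    rw [pvBuild]
    by_cases h1 : xs.length ≤ 1
    · rw [dif_pos h1]
      match xs, hne, h1 with
      | p :: t, _, h1 =>
        have ht : t = [] := by
          simp only [List.length_cons] at h1
          exact List.eq_nil_of_length_eq_zero (by omega)
        subst ht
        refine ⟨rfl, trivial, ?_⟩
        intro q hq; simp at hq; subst hq; exact ⟨le_refl _, le_refl _⟩
    · rw [dif_neg h1]
      simp only at *
      have hlen2 : 2 ≤ xs.length := by omega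
      set m := xs.length / 2 with hm
      have hm1 : 1 ≤ m := by omega
      have hmlt : m < xs.length := by omega
      have htl : (xs.take m).length = m := by simp; omega
      have hdl : (xs.drop m).length = xs.length - m := by simp
      obtain ⟨hL1, hL2, hL3⟩ := ih (xs.take m) (by omega) (by intro hc; rw [hc] at htl; simp at htl; omega)
      obtain ⟨hR1, hR2, hR3⟩ := ih (xs.drop m) (by omega) (by intro hc; rw [hc] at hdl; simp at hdl; omega)
      refine ⟨?_, ?_, ?_⟩
      · rw [pvToList, hL1, hR1, List.take_append_drop]
      · refine ⟨hL2, hR2, ?_⟩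
        intro p hp
        rw [hL1, hR1, List.take_append_drop] at hp
        rcases (by rw [← List.take_append_drop m xs] at hp; exact List.mem_append.mp hp :
            p ∈ xs.take m ∨ p ∈ xs.drop m) with h | h
        · have := hL3 p h; refine ⟨by simp [pvHi]; left; exact this.1, by simp [pvMx]; left; exact this.2⟩
        · have := hR3 p h; refine ⟨by simp [pvHi]; right; exact this.1, by simp [pvMx]; right; exact this.2⟩
      · intro p hp
        rcases (by rw [← List.take_append_drop m xs] at hp; exact List.mem_append.mp hp :
            p ∈ xs.take m ∨ p ∈ xs.drop m) with h | h
        · have := hL3 p h; refine ⟨by simp [pvHi]; left; exact this.1, by simp [pvMx]; left; exact this.2⟩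
        · have := hR3 p h; refine ⟨by simp [pvHi]; right; exact this.1, by simp [pvMx]; right; exact this.2⟩

theorem pvFirstGE_spec (t : PvTree) (hwf : pvWf t) (s th : Int) :
    pvFirstGE t s th
      = ((pvToList t).find? (fun p => decide (s ≤ p.1) && decide (th ≤ p.2))).map Prod.fst := by
  induction t with
  | leaf i v =>
    by_cases hc : s ≤ i ∧ th ≤ v
    · simp [pvFirstGE, pvToList, hc.1, hc.2]
    · have : (decide (s ≤ i) && decide (th ≤ v)) = false := by
        rcases (not_and_or.mp hc) with h | h <;> simp [h]
      simp [pvFirstGE, pvToList, if_neg hc, List.find?, this]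
  | node hi mx l r ihl ihr =>
    obtain ⟨hwl, hwr, hbnd⟩ := hwf
    rw [pvFirstGE]
    by_cases hp : hi < s ∨ mx < th
    · rw [if_pos hp]
      have : ((pvToList l ++ pvToList r).find? (fun p => decide (s ≤ p.1) && decide (th ≤ p.2))) = none := by
        rw [List.find?_eq_none]
        intro p hpmem
        have := hbnd p hpmem
        rcases hp with h | h
        · simp; intro h1; omega
        · simp; intro h1; omega
      rw [pvToList, this]; rfl
    · rw [if_neg hp, pvToList, List.find?_append, ihl hwl, ihr hwr]
      cases (pvToList l).find? (fun p => decide (s ≤ p.1) && decide (th ≤ p.2)) with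
      | none => simp
      | some p => simp

theorem pvScanI_enum (l : List Int) : ∀ (a s th : Int),
    ((PySem.List.enumerate l a).find? (fun p => decide (s ≤ p.1) && decide (th ≤ p.2))).map Prod.fst
      = pvScanI l a s th := by
  induction l with
  | nil => intro a s th; simp [PySem.List.enumerate, pvScanI]
  | cons x xs ih =>
    intro a s th
    rw [PySem.List.enumerate_cons, List.find?_cons, pvScanI]
    by_cases hc : s ≤ a ∧ th ≤ x
    · simp [hc.1, hc.2]
    · have : (decide (s ≤ a) && decide (th ≤ x)) = false := by
        rcases (not_and_or.mp hc) with h | h <;> simp [h]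
      simp only [this, if_neg hc]
      exact ih (a+1) s th

theorem pvScanI_drop (l : List Int) : ∀ (a s th : Int), a ≤ s →
    pvScanI l a s th = pvScanI (l.drop (s - a).toNat) s s th := by
  induction l with
  | nil => intro a s th _; simp [pvScanI]
  | cons x xs ih =>
    intro a s th ha
    rcases eq_or_lt_of_le ha with h | h
    · subst h; simp [pvScanI]
    · rw [pvScanI, if_neg (by omega)]
      have h1 : (s - a).toNat = ((s - (a+1)).toNat) + 1 := by omega
      rw [h1, List.drop_succ_cons]
      exact ih (a+1) s th (by omega)

theorem pvFoldl_pfx : ∀ (xs pre : List Int) (a : Int),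
    (xs.foldl (fun (st : List Int × Int) x => (st.1 ++ [st.2 + x], st.2 + x)) (pre, a)).1
      = pre ++ pvPfxFrom a xs := by
  intro xs
  induction xs with
  | nil => intro pre a; simp [pvPfxFrom]
  | cons x xs ih =>
    intro pre a
    simp only [List.foldl_cons, pvPfxFrom]
    rw [ih (pre ++ [a + x]) (a + x)]
    simp

theorem pvPfx_len : ∀ (xs : List Int) (a : Int), (pvPfxFrom a xs).length = xs.length := by
  intro xs; induction xs with
  | nil => intro a; simp [pvPfxFrom]
  | cons x xs ih => intro a; simp [pvPfxFrom, ih]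

theorem pvPfx_step : ∀ (xs : List Int) (a : Int) (k : Nat), k < xs.length →
    (a :: pvPfxFrom a xs).getD (k + 1) 0 = (a :: pvPfxFrom a xs).getD k 0 + xs.getD k 0 := by
  intro xs
  induction xs with
  | nil => intro a k hk; simp at hk
  | cons x xs ih =>
    intro a k hk
    cases k with
    | zero => simp [pvPfxFrom]
    | succ k =>
      have := ih (a + x) k (by simpa using Nat.lt_of_succ_lt_succ hk)
      simpa [pvPfxFrom] using this

theorem pvMin?_append (xs : List Int) (y m : Int)
    (h : PySem.List.min? xs (fun z => z) = some m) :
    PySem.List.min? (xs ++ [y]) (fun z => z) = some (min m y) := by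
  cases xs with
  | nil => simp [PySem.List.min?] at h
  | cons x t =>
    rw [PySem.List.min?_id_cons] at h
    rw [List.cons_append, PySem.List.min?_id_cons, List.foldl_append]
    simp at h
    simp [h]

theorem pvMax?_append (xs : List Int) (y m : Int)
    (h : PySem.List.max? xs (fun z => z) = some m) :
    PySem.List.max? (xs ++ [y]) (fun z => z) = some (max m y) := by
  cases xs with
  | nil => simp [PySem.List.max?] at h
  | cons x t =>
    rw [PySem.List.max?_id_cons] at h
    rw [List.cons_append, PySem.List.max?_id_cons, List.foldl_append]
    simp at h
    simp [h]

theorem pvInner_eq (invalid : Int) (numbers P : List Int) (i : Nat)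
    (hlen : P.length = numbers.length + 1)
    (hstep : ∀ k : Nat, k < numbers.length → P.getD (k + 1) 0 = P.getD k 0 + numbers.getD k 0) :
    ∀ (j : Nat), i < j → j ≤ numbers.length →
    ∀ total minimal maximum : Int,
    total = P.getD j 0 - P.getD i 0 →
    PySem.List.min? ((numbers.drop i).take (j - i)) (fun y => y) = some minimal →
    PySem.List.max? ((numbers.drop i).take (j - i)) (fun y => y) = some maximum →
    pvAInner invalid numbers j total minimal maximum
      = match pvScanI (P.drop (j + 1)) ((j : Int) + 1) ((i : Int) + 2) (P.getD i 0 + invalid) with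
        | some k =>
          if PySem.List.pyGetD P k 0 = P.getD i 0 + invalid then
            match PySem.List.min? (PySem.List.slice numbers (some (i : Int)) (some k)) (fun y => y),
                  PySem.List.max? (PySem.List.slice numbers (some (i : Int)) (some k)) (fun y => y) with
            | some mn, some mx => some (mn + mx)
            | _, _ => none
          else none
        | none => none := by
  have key : ∀ (fuel j : Nat), numbers.length - j ≤ fuel → i < j → j ≤ numbers.length →
      ∀ total minimal maximum : Int,
      total = P.getD j 0 - P.getD i 0 →
      PySem.List.min? ((numbers.drop i).take (j - i)) (fun y => y) = some minimal →
      PySem.List.max? ((numbers.drop i).take (j - i)) (fun y => y) = some maximum →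
      pvAInner invalid numbers j total minimal maximum
        = match pvScanI (P.drop (j + 1)) ((j : Int) + 1) ((i : Int) + 2) (P.getD i 0 + invalid) with
          | some k =>
            if PySem.List.pyGetD P k 0 = P.getD i 0 + invalid then
              match PySem.List.min? (PySem.List.slice numbers (some (i : Int)) (some k)) (fun y => y),
                    PySem.List.max? (PySem.List.slice numbers (some (i : Int)) (some k)) (fun y => y) with
              | some mn, some mx => some (mn + mx)
              | _, _ => none
            else none
          | none => none := by
    intro fuel
    induction fuel with
    | zero =>
      intro j hf hij hjn total minimal maximum htot hmin hmax
      have hj : j = numbers.length := by omega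
      rw [pvAInner, dif_neg (by omega), List.drop_eq_nil_of_le (by omega), pvScanI]
    | succ fuel ihf =>
      intro j hf hij hjn total minimal maximum htot hmin hmax
      by_cases hj : j < numbers.length
      · rw [pvAInner, dif_pos hj]
        have hx : numbers.getD j 0 = numbers[j] := List.getD_eq_getElem numbers 0 hj
        have hstepj := hstep j hj
        have hj1 : j + 1 < P.length := by omega
        have hgd : P.getD (j + 1) 0 = P[j + 1] := List.getD_eq_getElem P 0 hj1
        have hdropP : P.drop (j + 1) = P[j + 1] :: P.drop (j + 1 + 1) :=
          List.drop_eq_getElem_cons hj1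
        rw [hdropP, pvScanI]
        have hcast : (j : Int) + 1 = ((j + 1 : Nat) : Int) := by push_cast; ring
        have hW : (numbers.drop i).take (j + 1 - i) = (numbers.drop i).take (j - i) ++ [numbers[j]] := by
          have h1 : j + 1 - i = (j - i) + 1 := by omega
          rw [h1, List.take_add_one, List.getElem?_drop]
          have h2 : i + (j - i) = j := by omega
          rw [h2, List.getElem?_eq_getElem hj]
          rfl
        by_cases hge : P.getD i 0 + invalid ≤ P[j + 1]
        · by_cases heq : P.getD (j + 1) 0 = P.getD i 0 + invalid
          · have htot' : total + numbers[j] = invalid := by rw [hx] at hstepj; omega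
            rw [if_pos htot',
              if_pos (⟨by omega, hge⟩ : (i : Int) + 2 ≤ (j : Int) + 1 ∧ P.getD i 0 + invalid ≤ P[j + 1])]
            simp only [hcast, PySem.List.pyGetD_natCast, if_pos heq, PySem.List.slice_natCast]
            rw [hW, pvMin?_append _ _ _ hmin, pvMax?_append _ _ _ hmax]
          · have hne : ¬ (total + numbers[j] = invalid) := by rw [hx] at hstepj; omega
            have hlt : invalid < total + numbers[j] := by rw [hx, hgd] at hstepj; omega
            rw [if_neg hne, if_pos hlt,
              if_pos (⟨by omega, hge⟩ : (i : Int) + 2 ≤ (j : Int) + 1 ∧ P.getD i 0 + invalid ≤ P[j + 1])]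
            simp only [hcast, PySem.List.pyGetD_natCast, if_neg heq]
        · have hne : ¬ (total + numbers[j] = invalid) := by rw [hx, hgd] at hstepj; omega
          have hnlt : ¬ (invalid < total + numbers[j]) := by rw [hx, hgd] at hstepj; omega
          rw [if_neg hne, if_neg hnlt,
            if_neg (fun hc => hge hc.2 :
              ¬ ((i : Int) + 2 ≤ (j : Int) + 1 ∧ P.getD i 0 + invalid ≤ P[j + 1]))]
          have hmin' : PySem.List.min? ((numbers.drop i).take (j + 1 - i)) (fun y => y)
              = some (min minimal numbers[j]) := by rw [hW]; exact pvMin?_append _ _ _ hmin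
          have hmax' : PySem.List.max? ((numbers.drop i).take (j + 1 - i)) (fun y => y)
              = some (max maximum numbers[j]) := by rw [hW]; exact pvMax?_append _ _ _ hmax
          have hrec := ihf (j + 1) (by omega) (by omega) (by omega)
            (total + numbers[j]) (min minimal numbers[j]) (max maximum numbers[j])
            (by rw [hx] at hstepj; omega) hmin' hmax'
          rw [hrec]
          have hcast2 : ((j + 1 : Nat) : Int) + 1 = (j : Int) + 1 + 1 := by push_cast; ring
          rw [hcast2]
      · have hj' : j = numbers.length := by omega
        rw [pvAInner, dif_neg (by omega), List.drop_eq_nil_of_le (by omega), pvScanI]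
  intro j hij hjn
  exact key numbers.length j (by omega) hij hjn

theorem pvScanI_some : ∀ (l : List Int) (a s th k : Int),
    pvScanI l a s th = some k → s ≤ k ∧ a ≤ k ∧ k < a + l.length := by
  intro l
  induction l with
  | nil => intro a s th k h; simp [pvScanI] at h
  | cons x xs ih =>
    intro a s th k h
    rw [pvScanI] at h
    by_cases hc : s ≤ a ∧ th ≤ x
    · rw [if_pos hc] at h
      injection h with h; subst h
      refine ⟨hc.1, le_refl _, by simp⟩
    · rw [if_neg hc] at h
      obtain ⟨h1, h2, h3⟩ := ih (a + 1) s th k h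
      refine ⟨h1, by omega, by simp at h3 ⊢; omega⟩

theorem pvOuter_eq (invalid : Int) (numbers P : List Int) (tree : PvTree)
    (hlen : P.length = numbers.length + 1)
    (hstep : ∀ k : Nat, k < numbers.length → P.getD (k + 1) 0 = P.getD k 0 + numbers.getD k 0)
    (htree : ∀ s th : Int, pvFirstGE tree s th = pvScanI P 0 s th) :
    ∀ i : Nat, pvAOuter invalid numbers i = pvBLoop invalid numbers P tree i := by
  have key : ∀ (fuel i : Nat), numbers.length - i ≤ fuel →
      pvAOuter invalid numbers i = pvBLoop invalid numbers P tree i := by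
    intro fuel
    induction fuel with
    | zero =>
      intro i hf
      rw [pvAOuter, dif_neg (by omega), pvBLoop, dif_neg (by omega)]
    | succ fuel ihf =>
      intro i hf
      by_cases hi : i < numbers.length
      · rw [pvAOuter, dif_pos hi, pvBLoop, dif_pos hi]
        dsimp only
        have hstepi := hstep i hi
        have hx : numbers.getD i 0 = numbers[i] := List.getD_eq_getElem numbers 0 hi
        have hdropN : numbers.drop i = numbers[i] :: numbers.drop (i + 1) :=
          List.drop_eq_getElem_cons hi
        have hone : i + 1 - i = 1 := by omega
        have hsingle : (numbers.drop i).take (i + 1 - i) = [numbers[i]] := by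
          rw [hone, hdropN, List.take_succ_cons, List.take_zero]
        have hmin : PySem.List.min? ((numbers.drop i).take (i + 1 - i)) (fun y => y)
            = some numbers[i] := by
          rw [hsingle, PySem.List.min?_id_cons]; rfl
        have hmax : PySem.List.max? ((numbers.drop i).take (i + 1 - i)) (fun y => y)
            = some numbers[i] := by
          rw [hsingle, PySem.List.max?_id_cons]; rfl
        have hinner := pvInner_eq invalid numbers P i hlen hstep (i + 1) (by omega) (by omega)
          numbers[i] numbers[i] numbers[i] (by rw [hx] at hstepi; omega) hmin hmax
        rw [hinner, htree, PySem.List.pyGetD_natCast,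
          pvScanI_drop P 0 ((i : Int) + 2) (List.getD P i 0 + invalid) (by omega),
          show (((i : Int) + 2 - 0).toNat) = i + 2 from by omega,
          show ((i + 1 : Nat) : Int) + 1 = (i : Int) + 2 from by push_cast; ring,
          show i + 1 + 1 = i + 2 from rfl]
        cases hsc : pvScanI (P.drop (i + 2)) ((i : Int) + 2) ((i : Int) + 2) (P.getD i 0 + invalid) with
        | none => exact ihf (i + 1) (by omega)
        | some k =>
          dsimp only
          by_cases hk : PySem.List.pyGetD P k 0 = P.getD i 0 + invalid
          · rw [if_pos hk, if_pos hk]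
            obtain ⟨hk1, hk2, hk3⟩ := pvScanI_some (P.drop (i + 2)) ((i : Int) + 2)
              ((i : Int) + 2) (P.getD i 0 + invalid) k hsc
            have hwnd : PySem.List.slice numbers (some (i : Int)) (some k) ≠ [] := by
              have hkn : k.toNat ≥ i + 2 := by omega
              rw [PySem.List.slice_of_nonneg _ (by omega) (by omega) (by omega)
                  (by simp only [List.length_drop] at hk3; omega)]
              intro hc
              have := congrArg List.length hc
              simp only [List.length_take, List.length_drop, List.length_nil] at this
              omega
            cases hmn : PySem.List.min? (PySem.List.slice numbers (some (i : Int)) (some k))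
                (fun y => y) with
            | none => exact absurd ((PySem.List.min?_eq_none_iff _ _).mp hmn) hwnd
            | some mn =>
              cases hmx : PySem.List.max? (PySem.List.slice numbers (some (i : Int)) (some k))
                  (fun y => y) with
              | none => exact absurd ((PySem.List.max?_eq_none_iff _ _).mp hmx) hwnd
              | some mx => rfl
          · rw [if_neg hk, if_neg hk]
            exact ihf (i + 1) (by omega)
      · rw [pvAOuter, dif_neg (by omega), pvBLoop, dif_neg (by omega)]
  intro i
  exact key numbers.length i (by omega)

-- ===== VERDICT (by name: the statement is the Claim_ definition above) =====
theorem encryption_weakness_spec : Claim_equal_encryption_weakness := by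
  intro invalid numbers _hdom
  unfold Spec_encryption_weakness encryption_weakness encryption_weakness_alt
  have hpref : (numbers.foldl
      (fun (st : List Int × Int) x => (st.1 ++ [st.2 + x], st.2 + x)) ([0], 0)).1
      = (0 : Int) :: pvPfxFrom 0 numbers := by
    rw [pvFoldl_pfx numbers [0] 0]; rfl
  simp only [hpref]
  set P : List Int := (0 : Int) :: pvPfxFrom 0 numbers with hP
  have hlen : P.length = numbers.length + 1 := by
    rw [hP]; simp [pvPfx_len]
  have hne : PySem.List.enumerate P 0 ≠ [] := by
    rw [hP, PySem.List.enumerate_cons]; simp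
  have hb := pvBuild_spec (PySem.List.enumerate P 0).length (PySem.List.enumerate P 0)
    (le_refl _) hne
  have htree : ∀ s th : Int,
      pvFirstGE (pvBuild (PySem.List.enumerate P 0)) s th = pvScanI P 0 s th := by
    intro s th
    rw [pvFirstGE_spec _ hb.2.1 s th, hb.1, pvScanI_enum]
  exact pvOuter_eq invalid numbers P (pvBuild (PySem.List.enumerate P 0)) hlen
    (fun k hk => pvPfx_step numbers 0 k hk) htree 0
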